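-- pv_equiv track=rewrite | github.com/revjkee/aethernova | core-systems/genius-core/self_inhibitor/strategies/sandbox_checks.py | _capset_from_hex
-- ===== SOURCE A (Python) =====
-- from typing import Any, Dict, Iterable, List, Mapping, Optional, Tuple
--
-- def _capset_from_hex(hexval: str) -> List[str]:
--     """
--     Преобразует 64-битную маску CapEff в список имён capabilities.
--     Список основных cap (Linux, может различаться по ядру — best-effort).
--     """
--     try:
--         mask = int(hexval, 16)
--     except Exception:
--         return []
--     cap_names = [
--         "CAP_CHOWN","CAP_DAC_OVERRIDE","CAP_DAC_READ_SEARCH","CAP_FOWNER","CAP_FSETID",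
--         "CAP_KILL","CAP_SETGID","CAP_SETUID","CAP_SETPCAP","CAP_LINUX_IMMUTABLE",
--         "CAP_NET_BIND_SERVICE","CAP_NET_BROADCAST","CAP_NET_ADMIN","CAP_NET_RAW",
--         "CAP_IPC_LOCK","CAP_IPC_OWNER","CAP_SYS_MODULE","CAP_SYS_RAWIO","CAP_SYS_CHROOT",
--         "CAP_SYS_PTRACE","CAP_SYS_PACCT","CAP_SYS_ADMIN","CAP_SYS_BOOT","CAP_SYS_NICE",
--         "CAP_SYS_RESOURCE","CAP_SYS_TIME","CAP_SYS_TTY_CONFIG","CAP_MKNOD","CAP_LEASE",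
--         "CAP_AUDIT_WRITE","CAP_AUDIT_CONTROL","CAP_SETFCAP","CAP_MAC_OVERRIDE",
--         "CAP_MAC_ADMIN","CAP_SYSLOG","CAP_WAKE_ALARM","CAP_BLOCK_SUSPEND","CAP_AUDIT_READ",
--         "CAP_BPF","CAP_CHECKPOINT_RESTORE","CAP_PERFMON","CAP_SYS_BOOT"  # последняя может дублироваться — ok
--     ]
--     out = []
--     for i, name in enumerate(cap_names):
--         if mask & (1 << i):
--             out.append(name)
--     return out
-- ===== SOURCE B (Python) =====
-- def _capset_from_hex(hexval: str):
--     try: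
--         mask = int(hexval, 16)
--     except Exception:
--         return []
--     cap_names = [
--         "CAP_CHOWN","CAP_DAC_OVERRIDE","CAP_DAC_READ_SEARCH","CAP_FOWNER","CAP_FSETID",
--         "CAP_KILL","CAP_SETGID","CAP_SETUID","CAP_SETPCAP","CAP_LINUX_IMMUTABLE",
--         "CAP_NET_BIND_SERVICE","CAP_NET_BROADCAST","CAP_NET_ADMIN","CAP_NET_RAW",
--         "CAP_IPC_LOCK","CAP_IPC_OWNER","CAP_SYS_MODULE","CAP_SYS_RAWIO","CAP_SYS_CHROOT",
--         "CAP_SYS_PTRACE","CAP_SYS_PACCT","CAP_SYS_ADMIN","CAP_SYS_BOOT","CAP_SYS_NICE",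
--         "CAP_SYS_RESOURCE","CAP_SYS_TIME","CAP_SYS_TTY_CONFIG","CAP_MKNOD","CAP_LEASE",
--         "CAP_AUDIT_WRITE","CAP_AUDIT_CONTROL","CAP_SETFCAP","CAP_MAC_OVERRIDE",
--         "CAP_MAC_ADMIN","CAP_SYSLOG","CAP_WAKE_ALARM","CAP_BLOCK_SUSPEND","CAP_AUDIT_READ",
--         "CAP_BPF","CAP_CHECKPOINT_RESTORE","CAP_PERFMON","CAP_SYS_BOOT"  # последняя может дублироваться — ok
--     ]
--     # iterate over the SET BITS only: keep the 42 relevant bits, then repeatedly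
--     # strip the lowest set bit, mapping its position straight to a name
--     out = []
--     m = mask & ((1 << len(cap_names)) - 1)
--     while m:
--         nm = m & (m - 1)      # m with its lowest set bit cleared
--         low = m - nm          # the lowest set bit itself (a power of two)
--         out.append(cap_names[low.bit_length() - 1])
--         m = nm
--     return out
-- ===== Notes on version B (the rewrite author's own statement) =====
-- stated objective: alternative
-- what changed: Instead of scanning all 42 capability names and testing mask & (1 << i) for each index, B masks off the 42 relevant bits once and then iterates only over the set bits of the mask, repeatedly stripping the lowest set bit (nm = m & (m-1)) and mapping its position (via bit_length of m - nm) straight to a name, so the loop runs once per set bit instead of once per name.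
import Mathlib
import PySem

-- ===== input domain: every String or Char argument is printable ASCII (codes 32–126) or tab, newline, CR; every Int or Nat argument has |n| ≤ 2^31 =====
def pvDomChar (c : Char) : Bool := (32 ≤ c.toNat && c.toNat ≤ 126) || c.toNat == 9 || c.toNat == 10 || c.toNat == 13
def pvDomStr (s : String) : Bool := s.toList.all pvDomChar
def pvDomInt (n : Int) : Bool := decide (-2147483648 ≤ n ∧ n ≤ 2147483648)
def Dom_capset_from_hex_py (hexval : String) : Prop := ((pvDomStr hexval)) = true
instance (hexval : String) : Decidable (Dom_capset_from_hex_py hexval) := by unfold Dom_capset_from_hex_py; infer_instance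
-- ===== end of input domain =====

-- B iterates only over the SET BITS of the (42-bit-masked) value, stripping the lowest set bit each round, instead of testing all 42 names' bits; alternative decomposition, same result.

-- shared capability-name table (verbatim from the Python sources)
def pvCapNames : List String := [
  "CAP_CHOWN","CAP_DAC_OVERRIDE","CAP_DAC_READ_SEARCH","CAP_FOWNER","CAP_FSETID",
  "CAP_KILL","CAP_SETGID","CAP_SETUID","CAP_SETPCAP","CAP_LINUX_IMMUTABLE",
  "CAP_NET_BIND_SERVICE","CAP_NET_BROADCAST","CAP_NET_ADMIN","CAP_NET_RAW",
  "CAP_IPC_LOCK","CAP_IPC_OWNER","CAP_SYS_MODULE","CAP_SYS_RAWIO","CAP_SYS_CHROOT",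
  "CAP_SYS_PTRACE","CAP_SYS_PACCT","CAP_SYS_ADMIN","CAP_SYS_BOOT","CAP_SYS_NICE",
  "CAP_SYS_RESOURCE","CAP_SYS_TIME","CAP_SYS_TTY_CONFIG","CAP_MKNOD","CAP_LEASE",
  "CAP_AUDIT_WRITE","CAP_AUDIT_CONTROL","CAP_SETFCAP","CAP_MAC_OVERRIDE",
  "CAP_MAC_ADMIN","CAP_SYSLOG","CAP_WAKE_ALARM","CAP_BLOCK_SUSPEND","CAP_AUDIT_READ",
  "CAP_BPF","CAP_CHECKPOINT_RESTORE","CAP_PERFMON","CAP_SYS_BOOT"]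

-- ===== PORT A =====
-- int(hexval, 16) → PySem.Int.ofStrBase?; 'mask & (1 << i)' truthiness → Int.land … ≠ 0
-- (Int.land / <<< on nonnegative shift are exactly Python's & and <<)
def capset_from_hex_py (hexval : String) : List String :=
  match PySem.Int.ofStrBase? hexval 16 with
  | none => []
  | some mask =>
    (PySem.List.enumerate pvCapNames).foldl
      (fun out p => if Int.land mask ((1 : Int) <<< p.1) ≠ 0 then out ++ [p.2] else out) []

-- ===== PORT B =====
-- Source B's while loop: m is nonnegative (it is 'mask & ((1 << 42) - 1)'), so it is a Nat here;
-- 'low.bit_length() - 1' on the positive power of two low is exactly Nat.log2 low, and the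
-- index is always < 42 thanks to the masking, so getD is Python's cap_names[…] exactly
def pvLowLoop (m : Nat) : List String :=
  if h : m = 0 then []
  else
    let nm := m &&& (m - 1)
    let low := m - nm
    pvCapNames.getD (Nat.log2 low) "" :: pvLowLoop nm
termination_by m
decreasing_by exact lt_of_le_of_lt Nat.and_le_right (Nat.sub_lt (Nat.pos_of_ne_zero h) one_pos)

def capset_from_hex_py_alt (hexval : String) : List String :=
  match PySem.Int.ofStrBase? hexval 16 with
  | none => []
  | some mask =>
    pvLowLoop (Int.land mask ((1 <<< (pvCapNames.length : Int)) - 1)).toNat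

-- ===== PRECONDITION & SPEC =====
def Spec_capset_from_hex_py (hexval : String) (out : List String) : Prop := out = capset_from_hex_py_alt hexval
instance (hexval : String) (out : List String) : Decidable (Spec_capset_from_hex_py hexval out) := by unfold Spec_capset_from_hex_py; infer_instance

-- ===== CLAIM (what is proved, stated in full; the proofs are below) =====
def Claim_equal_capset_from_hex_py : Prop := ∀ (hexval : String), Dom_capset_from_hex_py hexval → Spec_capset_from_hex_py hexval (capset_from_hex_py hexval)

-- ===== LEMMAS AND PROOFS =====

-- A's append-if fold as a filterMap
theorem pv_foldl_char (mask : Int) (l : List (Int × String)) (acc : List String) :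
    l.foldl (fun out p => if Int.land mask ((1 : Int) <<< p.1) ≠ 0 then out ++ [p.2] else out) acc
      = acc ++ l.filterMap (fun p => if Int.land mask ((1 : Int) <<< p.1) ≠ 0 then some p.2 else none) := by
  induction l generalizing acc with
  | nil => simp
  | cons x xs ih =>
    rw [List.foldl_cons, ih, List.filterMap_cons]
    split <;> simp

-- enumerate-then-filterMap as an index scan
theorem pv_enum_char (q : Int → Prop) [DecidablePred q] (l : List String) (s : Int) :
    (PySem.List.enumerate l s).filterMap (fun p => if q p.1 then some p.2 else none)
      = (List.range l.length).filterMap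
          (fun (j : ℕ) => if q (s + (j : Int)) then some (l.getD j "") else none) := by
  induction l generalizing s with
  | nil => simp [PySem.List.enumerate_nil]
  | cons x xs ih =>
    rw [PySem.List.enumerate_cons, List.filterMap_cons]
    have htail : ((fun (j : ℕ) => if q (s + (j : Int)) then some ((x :: xs).getD j "") else none) ∘ Nat.succ)
        = fun (j : ℕ) => if q ((s + 1) + (j : Int)) then some (xs.getD j "") else none := by
      funext j
      have hc : s + ((j : Int) + 1) = (s + 1) + (j : Int) := by ring
      simp only [Function.comp, Nat.succ_eq_add_one, Nat.cast_add, Nat.cast_one,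
        List.getD_cons_succ]
      rw [hc]
    rw [List.length_cons, List.range_succ_eq_map, List.filterMap_cons, List.filterMap_map, htail,
      ih (s + 1)]
    simp

-- n &&& 2^i is nonzero exactly on a set bit
theorem pv_and_pow_ne (n i : ℕ) : (n &&& 2 ^ i ≠ 0) ↔ n.testBit i = true := by
  rw [Nat.and_two_pow]
  cases h : n.testBit i <;> simp [(Nat.two_pow_pos i).ne']

-- ldiff (2^i) n is nonzero exactly on a clear bit
theorem pv_ldiff_pow_ne (n i : ℕ) : (Nat.ldiff (2 ^ i) n ≠ 0) ↔ n.testBit i = false := by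
  cases h : n.testBit i
  · have : Nat.ldiff (2 ^ i) n = 2 ^ i := by
      refine Nat.eq_of_testBit_eq fun j => ?_
      rcases eq_or_ne j i with rfl | hj
      · simp [Nat.testBit_ldiff, h, Nat.testBit_two_pow_self]
      · simp [Nat.testBit_ldiff, Nat.testBit_two_pow_of_ne (Ne.symm hj)]
    simp [this]
  · have : Nat.ldiff (2 ^ i) n = 0 := by
      refine Nat.eq_of_testBit_eq fun j => ?_
      rcases eq_or_ne j i with rfl | hj
      · simp [Nat.testBit_ldiff, h]
      · simp [Nat.testBit_ldiff, Nat.testBit_two_pow_of_ne (Ne.symm hj)]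
    simp [this]

-- the masked Nat that B loops on
def pvMasked (mask : Int) : Nat := (Int.land mask ((1 <<< (pvCapNames.length : Int)) - 1)).toNat

theorem pv_shift42 : ((1 : Int) <<< ((pvCapNames.length : ℕ) : Int)) - 1 = ((2 ^ 42 - 1 : ℕ) : Int) := by
  decide

-- bridge: A's per-index test equals a bit of the masked Nat, for indices below 42
theorem pv_key (mask : Int) (j : ℕ) (hj : j < 42) :
    (Int.land mask ((1 : Int) <<< (j : Int)) ≠ 0) ↔ (pvMasked mask).testBit j = true := by
  have e1 : (1 : Int) <<< (j : Int) = ((2 ^ j : ℕ) : Int) := Int.one_shiftLeft j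
  unfold pvMasked
  rw [pv_shift42, e1]
  cases mask with
  | ofNat n =>
    have hl : Int.land (Int.ofNat n) ((2 ^ j : ℕ) : Int) = ((n &&& 2 ^ j : ℕ) : Int) := rfl
    have hl2 : Int.land (Int.ofNat n) ((2 ^ 42 - 1 : ℕ) : Int) = ((n &&& (2 ^ 42 - 1) : ℕ) : Int) := rfl
    rw [hl, hl2, Int.toNat_natCast]
    rw [Nat.testBit_and, Nat.testBit_two_pow_sub_one]
    simp [pv_and_pow_ne, hj]
  | negSucc n =>
    have hl : Int.land (Int.negSucc n) ((2 ^ j : ℕ) : Int) = ((Nat.ldiff (2 ^ j) n : ℕ) : Int) := rfl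
    have hl2 : Int.land (Int.negSucc n) ((2 ^ 42 - 1 : ℕ) : Int)
        = ((Nat.ldiff (2 ^ 42 - 1) n : ℕ) : Int) := rfl
    rw [hl, hl2, Int.toNat_natCast]
    rw [Nat.testBit_ldiff, Nat.testBit_two_pow_sub_one]
    simp [pv_ldiff_pow_ne, hj]

-- high bits of the masked Nat are clear
theorem pv_masked_high (mask : Int) (j : ℕ) (hj : 42 ≤ j) : (pvMasked mask).testBit j = false := by
  unfold pvMasked
  rw [pv_shift42]
  cases mask with
  | ofNat n =>
    have hl2 : Int.land (Int.ofNat n) ((2 ^ 42 - 1 : ℕ) : Int) = ((n &&& (2 ^ 42 - 1) : ℕ) : Int) := rfl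
    rw [hl2, Int.toNat_natCast, Nat.testBit_and, Nat.testBit_two_pow_sub_one]
    simp [Nat.not_lt.mpr hj]
  | negSucc n =>
    have hl2 : Int.land (Int.negSucc n) ((2 ^ 42 - 1 : ℕ) : Int)
        = ((Nat.ldiff (2 ^ 42 - 1) n : ℕ) : Int) := rfl
    rw [hl2, Int.toNat_natCast, Nat.testBit_ldiff, Nat.testBit_two_pow_sub_one]
    simp [Nat.not_lt.mpr hj]

-- (2a) &&& (2b+1) = 2 (a &&& b)
theorem pv_and_even_odd (a b : ℕ) : (2 * a) &&& (2 * b + 1) = 2 * (a &&& b) := by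
  refine Nat.eq_of_testBit_eq fun j => ?_
  cases j with
  | zero => simp [Nat.testBit_and, Nat.testBit_zero, Nat.mul_comm, Nat.mul_add_mod]
  | succ j =>
    have h1 : (2 * a) / 2 = a := by omega
    have h2 : (2 * b + 1) / 2 = b := by omega
    have h3 : (2 * (a &&& b)) / 2 = a &&& b := by omega
    rw [Nat.testBit_and, Nat.testBit_add_one, Nat.testBit_add_one, Nat.testBit_add_one,
      h1, h2, h3, Nat.testBit_and]

-- (2a+1) &&& (2a) = 2a
theorem pv_and_odd_pred (a : ℕ) : (2 * a + 1) &&& (2 * a) = 2 * a := by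
  refine Nat.eq_of_testBit_eq fun j => ?_
  cases j with
  | zero => simp [Nat.testBit_and, Nat.testBit_zero, Nat.mul_comm, Nat.mul_add_mod]
  | succ j =>
    have h1 : (2 * a + 1) / 2 = a := by omega
    have h2 : (2 * a) / 2 = a := by omega
    rw [Nat.testBit_and, Nat.testBit_add_one, Nat.testBit_add_one, h1, h2, Bool.and_self]

-- stripping the lowest set bit: position, cleared-bit profile, and the extracted power of two
theorem pv_strip (m : ℕ) (hm : m ≠ 0) :
    ∃ i : ℕ, m.testBit i = true ∧ (∀ j, j < i → m.testBit j = false) ∧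
      (∀ j, (m &&& (m - 1)).testBit j = if j = i then false else m.testBit j) ∧
      m - (m &&& (m - 1)) = 2 ^ i := by
  induction m using Nat.strong_induction_on with
  | _ m ih =>
    rcases Nat.even_or_odd m with ⟨c, hc⟩ | ⟨c, hc⟩
    · -- even, m = 2c with c ≠ 0
      have hm2 : m = 2 * c := by omega
      have hc0 : c ≠ 0 := by omega
      obtain ⟨i, hbit, hlow, hclr, hpow⟩ := ih c (by omega) hc0
      refine ⟨i + 1, ?_, ?_, ?_, ?_⟩
      · have : m / 2 = c := by omega
        simp [Nat.testBit_add_one, this, hbit]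
      · intro j hj
        cases j with
        | zero => simp [hm2, Nat.testBit_zero, Nat.mul_comm, Nat.mul_add_mod]
        | succ j =>
          have : m / 2 = c := by omega
          simp [Nat.testBit_add_one, this, hlow j (by omega)]
      · intro j
        have hrw : m &&& (m - 1) = 2 * (c &&& (c - 1)) := by
          have : m - 1 = 2 * (c - 1) + 1 := by omega
          rw [this, hm2, pv_and_even_odd]
        cases j with
        | zero =>
          simp [hrw, hm2, Nat.testBit_zero, Nat.mul_comm, Nat.mul_add_mod]
        | succ j =>
          have h1 : (2 * (c &&& (c - 1))) / 2 = c &&& (c - 1) := by omega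
          have h2 : m / 2 = c := by omega
          rw [hrw, Nat.testBit_add_one, h1, hclr j]
          rcases eq_or_ne j i with rfl | hne
          · simp
          · have : j + 1 ≠ i + 1 := by omega
            simp [hne, this, Nat.testBit_add_one, h2]
      · have hrw : m &&& (m - 1) = 2 * (c &&& (c - 1)) := by
          have : m - 1 = 2 * (c - 1) + 1 := by omega
          rw [this, hm2, pv_and_even_odd]
        have hle : c &&& (c - 1) ≤ c := Nat.and_le_left
        have : m - (m &&& (m - 1)) = 2 * (c - (c &&& (c - 1))) := by omega
        rw [this, hpow, pow_succ]
        ring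
    · -- odd, m = 2c+1
      have hm2 : m = 2 * c + 1 := by omega
      have hrw : m &&& (m - 1) = m - 1 := by
        have : m - 1 = 2 * c := by omega
        rw [this, hm2, pv_and_odd_pred]
      refine ⟨0, ?_, by omega, ?_, ?_⟩
      · simp [hm2, Nat.testBit_zero, Nat.mul_comm, Nat.mul_add_mod]
      · intro j
        cases j with
        | zero =>
          have : m - 1 = 2 * c := by omega
          simp [hrw, this, Nat.testBit_zero, Nat.mul_comm, Nat.mul_add_mod]
        | succ j =>
          have h1 : (m - 1) / 2 = c := by omega
          have h2 : m / 2 = c := by omega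
          simp [hrw, Nat.testBit_add_one, h1, h2]
      · omega

-- splitting a range-filterMap at the minimal hit
theorem pv_filterMap_split {α : Type} (n i : ℕ) (hin : i < n) (f g : ℕ → Option α) (a : α)
    (h0 : ∀ j, j < i → f j = none) (h0' : ∀ j, j < i → g j = none)
    (hfi : f i = some a) (hgi : g i = none) (hgt : ∀ j, i < j → f j = g j) :
    (List.range n).filterMap f = a :: (List.range n).filterMap g := by
  have hn : n = (i + 1) + (n - i - 1) := by omega
  have hsplit : List.range n = (List.range i ++ [i]) ++ (List.range (n - i - 1)).map ((i + 1) + ·) := by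
    conv_lhs => rw [hn]
    rw [List.range_add, List.range_succ]
  have hnil : ∀ h : ℕ → Option α, (∀ j, j < i → h j = none) → (List.range i).filterMap h = [] := by
    intro h hh
    rw [List.filterMap_eq_nil_iff]
    intro j hj
    exact hh j (List.mem_range.mp hj)
  have htail : ((List.range (n - i - 1)).map ((i + 1) + ·)).filterMap f
      = ((List.range (n - i - 1)).map ((i + 1) + ·)).filterMap g := by
    rw [List.filterMap_map, List.filterMap_map]
    refine List.filterMap_congr fun j _ => ?_
    exact hgt ((i + 1) + j) (by omega)
  rw [hsplit, List.filterMap_append, List.filterMap_append,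
    List.filterMap_append, List.filterMap_append,
    hnil f h0, hnil g h0', htail]
  simp [hfi, hgi]

-- B's loop scans the bits below n in ascending order whenever the bits from n on are clear
theorem pv_lowLoop_char (m : ℕ) : ∀ n : ℕ, (∀ j, n ≤ j → m.testBit j = false) →
    pvLowLoop m
      = (List.range n).filterMap
          (fun j => if m.testBit j then some (pvCapNames.getD j "") else none) := by
  induction m using Nat.strong_induction_on with
  | _ m ih =>
    intro n hhigh
    by_cases hm : m = 0
    · subst hm
      rw [pvLowLoop]
      simp
    · obtain ⟨i, hbit, hlow, hclr, hpow⟩ := pv_strip m hm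
      have hin : i < n := by
        by_contra hc
        rw [hhigh i (by omega)] at hbit
        exact Bool.false_ne_true hbit
      have hnm_lt : m &&& (m - 1) < m :=
        lt_of_le_of_lt Nat.and_le_right (Nat.sub_lt (Nat.pos_of_ne_zero hm) one_pos)
      have hnm_high : ∀ j, n ≤ j → (m &&& (m - 1)).testBit j = false := by
        intro j hj
        rw [hclr j]
        split
        · rfl
        · exact hhigh j hj
      rw [pvLowLoop, dif_neg hm]
      simp only
      rw [hpow, Nat.log2_two_pow, ih (m &&& (m - 1)) hnm_lt n hnm_high]
      refine (pv_filterMap_split n i hin _ _ (pvCapNames.getD i "") ?_ ?_ ?_ ?_ ?_).symm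
      · intro j hj; simp [hlow j hj]
      · intro j hj
        simp [hclr j, hlow j hj, (by omega : j ≠ i)]
      · simp [hbit]
      · simp [hclr i]
      · intro j hj
        rw [hclr j, if_neg (by omega : ¬ j = i)]

-- ===== VERDICT (by name: the statement is the Claim_ definition above) =====
theorem capset_from_hex_py_spec : Claim_equal_capset_from_hex_py := by
  intro hexval _
  unfold Spec_capset_from_hex_py capset_from_hex_py capset_from_hex_py_alt
  cases hp : PySem.Int.ofStrBase? hexval 16 with
  | none => rfl
  | some mask =>
    show _ = pvLowLoop (pvMasked mask)
    dsimp only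
    rw [pv_foldl_char mask _ [], List.nil_append,
      pv_enum_char (fun t => Int.land mask ((1 : Int) <<< t) ≠ 0) pvCapNames 0,
      pv_lowLoop_char (pvMasked mask) 42 (fun j hj => pv_masked_high mask j hj)]
    have hlen : pvCapNames.length = 42 := by decide
    rw [hlen]
    refine List.filterMap_congr fun j hj => ?_
    have hj42 : j < 42 := List.mem_range.mp hj
    have hq : (Int.land mask ((1 : Int) <<< ((0 : Int) + (j : Int))) ≠ 0) ↔ (pvMasked mask).testBit j = true := by
      rw [zero_add]
      exact pv_key mask j hj42
    by_cases hb : (pvMasked mask).testBit j = true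
    · rw [if_pos (hq.mpr hb), if_pos hb]
    · rw [if_neg (fun hc => hb (hq.mp hc)), if_neg (fun hc => hb hc)]
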